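-- pv_equiv track=rewrite | github.com/VIDA-NYU/openclean-pattern | openclean_pattern/utils/utils.py | substring_finder
-- ===== SOURCE A (Python) =====
-- def substring_finder(string1, string2):
--     anslist = []
--     len1, len2 = len(string1), len(string2)
--     for i in range(len1):
--         match = ""
--         for j in range(len2):
--             if (i + j < len1 and string1[i + j] == string2[j]):
--                 match += string2[j]
--             else:
--                 answer = match
--                 if answer != '' and len(answer) > 1:
--                     anslist.append(answer)
--                 match = ""
--         if match != '':
--             anslist.append(match)
--
--     return anslist
-- ===== SOURCE B (Python) =====
-- def substring_finder(string1, string2):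
--     n1, n2 = len(string1), len(string2)
--     out = []
--     for i in range(n1):
--         # diagonal match pattern for offset i
--         matched = [i + j < n1 and string1[i + j] == string2[j] for j in range(n2)]
--         start = None
--         for j, m in enumerate(matched):
--             if m:
--                 if start is None:
--                     start = j
--             else:
--                 if start is not None and j - start > 1:
--                     out.append(string2[start:j])
--                 start = None
--         if start is not None:
--             out.append(string2[start:n2])
--     return out
-- ===== Notes on version B (the rewrite author's own statement) =====
-- stated objective: alternative
-- what changed: B replaces A's character-by-character match accumulator (string concatenation with flush-on-mismatch) by computing, per offset, the boolean diagonal match pattern and scanning it for maximal runs by index, emitting slices string2[start:end] (end-start>1, or the run reaching the end of string2).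
import Mathlib
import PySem

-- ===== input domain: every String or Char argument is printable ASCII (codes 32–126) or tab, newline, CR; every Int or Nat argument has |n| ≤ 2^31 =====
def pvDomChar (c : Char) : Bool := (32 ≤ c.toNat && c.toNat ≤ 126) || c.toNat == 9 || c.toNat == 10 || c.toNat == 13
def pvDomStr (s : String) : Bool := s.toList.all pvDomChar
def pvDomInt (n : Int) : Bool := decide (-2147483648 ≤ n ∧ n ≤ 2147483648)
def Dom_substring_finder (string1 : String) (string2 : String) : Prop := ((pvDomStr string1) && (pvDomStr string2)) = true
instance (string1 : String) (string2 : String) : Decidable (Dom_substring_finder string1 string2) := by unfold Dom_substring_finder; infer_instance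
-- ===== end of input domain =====

-- B replaces A's char-by-char accumulator with a per-offset boolean diagonal and an index-run
-- scanner that emits slices; objective: alternative decomposition, same asymptotic cost.

-- ===== PORT A =====
-- inner-loop body of A: state (match, anslist), one step per j
def pvAStep (l1 l2 : List Char) (i : Nat) (st : List Char × List String) (j : Nat) :
    List Char × List String :=
  if i + j < l1.length ∧ l1.getD (i + j) ' ' = l2.getD j ' ' then
    (st.1 ++ [l2.getD j ' '], st.2)
  else
    let answer := st.1
    let anslist := if answer ≠ [] ∧ answer.length > 1 then st.2 ++ [String.ofList answer] else st.2
    ([], anslist)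

def substring_finder (string1 : String) (string2 : String) : List String :=
  let l1 := string1.toList
  let l2 := string2.toList
  (List.range l1.length).foldl (fun anslist i =>
    let st := (List.range l2.length).foldl (pvAStep l1 l2 i) ([], anslist)
    if st.1 ≠ [] then st.2 ++ [String.ofList st.1] else st.2) []

-- ===== PORT B =====
-- run-scanner step of B: state (start of current run or none, output), one step per (matched, j)
def pvBStep (l2 : List Char) (st : Option Nat × List String) (mj : Bool × Nat) :
    Option Nat × List String :=
  if mj.1 then
    match st.1 with
    | none => (some mj.2, st.2)
    | some s => (some s, st.2)
  else
    match st.1 with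
    | some s =>
        -- string2[s:j] is (l2.drop s).take (j - s): here 0 ≤ s < j ≤ len, so the plain slice is exact
        (none, if mj.2 - s > 1 then st.2 ++ [String.ofList ((l2.drop s).take (mj.2 - s))] else st.2)
    | none => (none, st.2)

def substring_finder_alt (string1 : String) (string2 : String) : List String :=
  let l1 := string1.toList
  let l2 := string2.toList
  (List.range l1.length).foldl (fun out i =>
    let matched := (List.range l2.length).map
      (fun j => decide (i + j < l1.length) && (l1.getD (i + j) ' ' == l2.getD j ' '))
    let st := matched.zipIdx.foldl (pvBStep l2) (none, out)
    match st.1 with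
    | some s => st.2 ++ [String.ofList ((l2.drop s).take (l2.length - s))]
    | none => st.2) []

-- ===== PRECONDITION & SPEC =====
def Spec_substring_finder (string1 : String) (string2 : String) (out : List String) : Prop := out = substring_finder_alt string1 string2
instance (string1 : String) (string2 : String) (out : List String) : Decidable (Spec_substring_finder string1 string2 out) := by unfold Spec_substring_finder; infer_instance

-- ===== CLAIM (what is proved, stated in full; the proofs are below) =====
def Claim_equal_substring_finder : Prop := ∀ (string1 : String) (string2 : String), Dom_substring_finder string1 string2 → Spec_substring_finder string1 string2 (substring_finder string1 string2)

-- ===== LEMMAS AND PROOFS =====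

-- simulation relation between A's accumulated match and B's run start, at position j
def pvRel (l2 : List Char) (j : Nat) (m : List Char) (start : Option Nat) : Prop :=
  match start with
  | none => m = []
  | some s => s < j ∧ m = (l2.drop s).take (j - s)

lemma pv_slice_succ (l2 : List Char) (s j : Nat) (hsj : s ≤ j) (hj : j < l2.length) :
    (l2.drop s).take (j + 1 - s) = (l2.drop s).take (j - s) ++ [l2.getD j ' '] := by
  have h1 : j + 1 - s = (j - s) + 1 := by omega
  have h2 : (l2.drop s)[j - s]? = some l2[j] := by
    rw [List.getElem?_drop, show s + (j - s) = j from by omega, List.getElem?_eq_getElem hj]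
  rw [h1, List.take_add_one, h2]
  simp [List.getD_eq_getElem?_getD, List.getElem?_eq_getElem hj]

lemma pv_slice_len (l2 : List Char) (s j : Nat) (hj : j ≤ l2.length) :
    ((l2.drop s).take (j - s)).length = j - s := by
  simp; omega

-- one inner loop, both sides, from position j for n more steps, given the relation
lemma pv_inner_sim (l1 l2 : List Char) (i : Nat) (n j : Nat) (hj : j + n = l2.length)
    (m : List Char) (start : Option Nat) (ans : List String) (hrel : pvRel l2 j m start) :
    (let st := (List.range' j n).foldl (pvAStep l1 l2 i) (m, ans)
     if st.1 ≠ [] then st.2 ++ [String.ofList st.1] else st.2) =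
    (let st := ((List.range' j n).map
        (fun j => ((decide (i + j < l1.length) && (l1.getD (i + j) ' ' == l2.getD j ' ')), j))).foldl
        (pvBStep l2) (start, ans)
     match st.1 with
     | some s => st.2 ++ [String.ofList ((l2.drop s).take (l2.length - s))]
     | none => st.2) := by
  induction n generalizing j m start ans with
  | zero =>
    simp only [List.range'_zero, List.map_nil, List.foldl_nil]
    match start, hrel with
    | none, hrel => simp only [pvRel] at hrel; simp [hrel]
    | some s, ⟨hs, hm⟩ =>
      have hlen : m.length = j - s := by rw [hm]; exact pv_slice_len l2 s j (by omega)
      have hne : m ≠ [] := by intro h; rw [h] at hlen; simp at hlen; omega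
      have hje : j = l2.length := by omega
      simp only [hne, if_true, ne_eq, not_false_eq_true]
      rw [hm, hje]
  | succ n ih =>
    have hjlt : j < l2.length := by omega
    rw [List.range'_succ]
    simp only [List.map_cons, List.foldl_cons]
    by_cases h : i + j < l1.length ∧ l1.getD (i + j) ' ' = l2.getD j ' '
    · have hb : (decide (i + j < l1.length) && (l1.getD (i + j) ' ' == l2.getD j ' ')) = true := by
        simp only [Bool.and_eq_true, decide_eq_true_eq, beq_iff_eq]; exact ⟨h.1, h.2⟩
      rw [show pvAStep l1 l2 i (m, ans) j = (m ++ [l2.getD j ' '], ans) from by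
        unfold pvAStep; rw [if_pos h]]
      rw [hb]
      match start, hrel with
      | none, hrel =>
        rw [show pvBStep l2 (none, ans) (true, j) = (some j, ans) from rfl]
        refine ih (j + 1) (by omega) _ _ _ ⟨by omega, ?_⟩
        rw [hrel, pv_slice_succ l2 j j le_rfl hjlt]
        simp
      | some s, ⟨hs, hm⟩ =>
        rw [show pvBStep l2 (some s, ans) (true, j) = (some s, ans) from rfl]
        refine ih (j + 1) (by omega) _ _ _ ⟨by omega, ?_⟩
        rw [hm, pv_slice_succ l2 s j (by omega) hjlt]
    · have hb : (decide (i + j < l1.length) && (l1.getD (i + j) ' ' == l2.getD j ' ')) = false := by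
        rw [Bool.and_eq_false_iff]
        by_cases h1 : i + j < l1.length
        · right; rw [beq_eq_false_iff_ne]; intro he; exact h ⟨h1, he⟩
        · left; simpa using h1
      rw [hb]
      match start, hrel with
      | none, hrel =>
        have hm0 : m = [] := hrel
        rw [show pvAStep l1 l2 i (m, ans) j = ([], ans) from by
          unfold pvAStep; rw [if_neg h]; simp [hm0]]
        rw [show pvBStep l2 (none, ans) (false, j) = (none, ans) from rfl]
        exact ih (j + 1) (by omega) _ _ _ rfl
      | some s, ⟨hs, hm⟩ =>
        have hlen : m.length = j - s := by rw [hm]; exact pv_slice_len l2 s j (by omega)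
        have hne : m ≠ [] := by intro hh; rw [hh] at hlen; simp at hlen; omega
        rw [show pvAStep l1 l2 i (m, ans) j
              = ([], if m ≠ [] ∧ m.length > 1 then ans ++ [String.ofList m] else ans) from by
          unfold pvAStep; rw [if_neg h]]
        rw [show pvBStep l2 (some s, ans) (false, j)
              = (none, if j - s > 1 then ans ++ [String.ofList ((l2.drop s).take (j - s))] else ans)
            from rfl]
        have hcond : (m ≠ [] ∧ m.length > 1) ↔ (j - s > 1) := by
          rw [hlen]; simp [hne]
        by_cases hgt : j - s > 1
        · rw [if_pos (hcond.mpr hgt), if_pos hgt, hm]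
          exact ih (j + 1) (by omega) _ _ _ rfl
        · rw [if_neg (fun hc => hgt (hcond.mp hc)), if_neg hgt]
          exact ih (j + 1) (by omega) _ _ _ rfl

lemma pv_zipIdx_map_range (n : Nat) (f : Nat → Bool) :
    ((List.range n).map f).zipIdx = (List.range n).map (fun j => (f j, j)) := by
  apply List.ext_getElem <;> simp [List.getElem_zipIdx]

-- ===== VERDICT (by name: the statement is the Claim_ definition above) =====
theorem substring_finder_spec : Claim_equal_substring_finder := by
  intro string1 string2 _
  unfold Spec_substring_finder substring_finder substring_finder_alt
  simp only []
  set l1 := string1.toList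
  set l2 := string2.toList
  apply PySem.List.foldl_congr_mem
  intro ans i _
  rw [pv_zipIdx_map_range, List.range_eq_range']
  exact pv_inner_sim l1 l2 i l2.length 0 (by omega) [] none ans rfl
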